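-- pv_equiv track=rewrite | github.com/PauraviW/leetcode-problems | Algorithms/spike jump dp.py | canStopRecusive
-- ===== SOURCE A (Python) =====
-- def canStopRecusive(runway, initSpeed, startIndex=0):
--
--     if startIndex >= len(runway) or startIndex < 0 or initSpeed < 0 or not runway[startIndex]:
--         return False
--
--     if initSpeed == 0:
--         return True
--
--     for adjustedSpeed in [initSpeed, initSpeed - 1, initSpeed + 1]:
--
--         if canStopRecusive(runway, adjustedSpeed, startIndex + adjustedSpeed):
--             return  True
--     return  False
-- ===== SOURCE B (Python) =====
-- def canStopRecusive(runway, initSpeed, startIndex=0):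
--     # Top-down memoization over (position, speed) states: each state is solved once.
--     n = len(runway)
--     memo = {}
--     def go(speed, idx):
--         if idx >= n or idx < 0 or speed < 0 or not runway[idx]:
--             return False
--         if speed == 0:
--             return True
--         key = (idx, speed)
--         if key in memo:
--             return memo[key]
--         res = (go(speed, idx + speed)
--                or go(speed - 1, idx + speed - 1)
--                or go(speed + 1, idx + speed + 1))
--         memo[key] = res
--         return res
--     return go(initSpeed, startIndex)
-- ===== Notes on version B (the rewrite author's own statement) =====
-- stated objective: alternative
-- what changed: Memoizes the three-way recursion in a dict keyed by (position, speed), so each state is solved at most once (O(n^2) states) instead of A's unbounded re-exploration.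
import Mathlib
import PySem

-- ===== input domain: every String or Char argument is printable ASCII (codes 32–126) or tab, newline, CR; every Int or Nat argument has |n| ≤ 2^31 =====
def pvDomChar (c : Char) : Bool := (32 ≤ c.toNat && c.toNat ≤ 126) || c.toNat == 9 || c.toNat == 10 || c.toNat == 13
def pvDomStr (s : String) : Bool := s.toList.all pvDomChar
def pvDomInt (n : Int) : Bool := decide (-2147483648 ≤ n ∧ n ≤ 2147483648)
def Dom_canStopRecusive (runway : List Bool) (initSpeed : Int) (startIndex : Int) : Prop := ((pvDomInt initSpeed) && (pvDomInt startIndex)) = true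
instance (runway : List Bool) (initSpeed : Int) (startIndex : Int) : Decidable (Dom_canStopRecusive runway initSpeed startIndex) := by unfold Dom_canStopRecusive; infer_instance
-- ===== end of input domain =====

-- B memoizes A's three-way recursion in a dict keyed by (position, speed), so each state is
-- solved at most once; same return value everywhere.

-- ===== PORT A =====
-- structural recursion on a fuel counter as totality guard; 2*len+2 always exceeds the
-- recursion depth measure, so the fuel never runs out (csrFuel_irrel below)
def csrFuel : Nat → List Bool → Int → Int → Bool
  | 0, _, _, _ => false
  | fuel + 1, runway, initSpeed, startIndex =>
    if startIndex ≥ (runway.length : Int) ∨ startIndex < 0 ∨ initSpeed < 0 ∨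
        ((PySem.List.pyGet? runway startIndex).getD false) = false then
      false
    else if initSpeed = 0 then
      true
    else
      csrFuel fuel runway initSpeed (startIndex + initSpeed) ||
      csrFuel fuel runway (initSpeed - 1) (startIndex + initSpeed - 1) ||
      csrFuel fuel runway (initSpeed + 1) (startIndex + initSpeed + 1)

def canStopRecusive (runway : List Bool) (initSpeed : Int) (startIndex : Int) : Bool :=
  csrFuel (2 * runway.length + 2) runway initSpeed startIndex

-- ===== PORT B =====
-- the inner closure go(speed, idx): fuel as totality guard, the memo dict threaded through
def goMemo (runway : List Bool) :
    Nat → Int → Int → PySem.Dict (Int × Int) Bool → Bool × PySem.Dict (Int × Int) Bool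
  | 0, _, _, m => (false, m)
  | fuel + 1, speed, idx, m =>
    if idx ≥ (runway.length : Int) ∨ idx < 0 ∨ speed < 0 ∨
        ((PySem.List.pyGet? runway idx).getD false) = false then
      (false, m)
    else if speed = 0 then
      (true, m)
    else
      match m.get? (idx, speed) with
      | some v => (v, m)
      | none =>
        let p1 := goMemo runway fuel speed (idx + speed) m
        if p1.1 then (true, p1.2.insert (idx, speed) true)
        else
          let p2 := goMemo runway fuel (speed - 1) (idx + speed - 1) p1.2
          if p2.1 then (true, p2.2.insert (idx, speed) true)
          else
            let p3 := goMemo runway fuel (speed + 1) (idx + speed + 1) p2.2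
            (p3.1, p3.2.insert (idx, speed) p3.1)

def canStopRecusive_alt (runway : List Bool) (initSpeed : Int) (startIndex : Int) : Bool :=
  (goMemo runway (2 * runway.length + 2) initSpeed startIndex PySem.Dict.empty).1

-- ===== PRECONDITION & SPEC =====
def Spec_canStopRecusive (runway : List Bool) (initSpeed : Int) (startIndex : Int) (out : Bool) : Prop := out = canStopRecusive_alt runway initSpeed startIndex
instance (runway : List Bool) (initSpeed : Int) (startIndex : Int) (out : Bool) : Decidable (Spec_canStopRecusive runway initSpeed startIndex out) := by unfold Spec_canStopRecusive; infer_instance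

-- ===== CLAIM (what is proved, stated in full; the proofs are below) =====
def Claim_equal_canStopRecusive : Prop := ∀ (runway : List Bool) (initSpeed : Int) (startIndex : Int), Dom_canStopRecusive runway initSpeed startIndex → Spec_canStopRecusive runway initSpeed startIndex (canStopRecusive runway initSpeed startIndex)

-- ===== LEMMAS AND PROOFS =====

-- recursion-depth measure of A's recursion
def csrMu (runway : List Bool) (s i : Int) : Nat :=
  2 * ((runway.length : Int) - i).toNat + (min s 1).toNat

lemma csrFuel_succ (f : Nat) (runway : List Bool) (s i : Int) :
    csrFuel (f + 1) runway s i =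
      if i ≥ (runway.length : Int) ∨ i < 0 ∨ s < 0 ∨
          ((PySem.List.pyGet? runway i).getD false) = false then false
      else if s = 0 then true
      else csrFuel f runway s (i + s) || csrFuel f runway (s - 1) (i + s - 1) ||
           csrFuel f runway (s + 1) (i + s + 1) := rfl

lemma csrFuel_irrel : ∀ (f g : Nat) (runway : List Bool) (s i : Int),
    csrMu runway s i < f → csrMu runway s i < g →
    csrFuel f runway s i = csrFuel g runway s i := by
  intro f
  induction f with
  | zero => intro g r s i hf _; exact absurd hf (Nat.not_lt_zero _)
  | succ f ih =>
    intro g r s i hf hg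
    obtain ⟨g', rfl⟩ : ∃ g', g = g' + 1 := ⟨g - 1, by omega⟩
    rw [csrFuel_succ, csrFuel_succ]
    by_cases hc : i ≥ (r.length : Int) ∨ i < 0 ∨ s < 0 ∨
        ((PySem.List.pyGet? r i).getD false) = false
    · rw [if_pos hc, if_pos hc]
    · rw [if_neg hc, if_neg hc]
      by_cases hz : s = 0
      · rw [if_pos hz, if_pos hz]
      · rw [if_neg hz, if_neg hz]
        push_neg at hc
        obtain ⟨h1, h2, h3, _⟩ := hc
        have m1 : csrMu r s (i + s) < csrMu r s i := by unfold csrMu; omega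
        have m2 : csrMu r (s - 1) (i + s - 1) < csrMu r s i := by unfold csrMu; omega
        have m3 : csrMu r (s + 1) (i + s + 1) < csrMu r s i := by unfold csrMu; omega
        rw [ih g' r s (i + s) (by omega) (by omega),
          ih g' r (s - 1) (i + s - 1) (by omega) (by omega),
          ih g' r (s + 1) (i + s + 1) (by omega) (by omega)]

lemma A_eq (runway : List Bool) (s i : Int) :
    canStopRecusive runway s i =
      if i ≥ (runway.length : Int) ∨ i < 0 ∨ s < 0 ∨
          ((PySem.List.pyGet? runway i).getD false) = false then false
      else if s = 0 then true
      else canStopRecusive runway s (i + s) ||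
           canStopRecusive runway (s - 1) (i + s - 1) ||
           canStopRecusive runway (s + 1) (i + s + 1) := by
  unfold canStopRecusive
  rw [show 2 * runway.length + 2 = (2 * runway.length + 1) + 1 from rfl, csrFuel_succ]
  by_cases hc : i ≥ (runway.length : Int) ∨ i < 0 ∨ s < 0 ∨
      ((PySem.List.pyGet? runway i).getD false) = false
  · rw [if_pos hc, if_pos hc]
  · rw [if_neg hc, if_neg hc]
    by_cases hz : s = 0
    · rw [if_pos hz, if_pos hz]
    · rw [if_neg hz, if_neg hz]
      push_neg at hc
      obtain ⟨h1, h2, h3, _⟩ := hc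
      have m1 : csrMu runway s (i + s) < csrMu runway s i := by unfold csrMu; omega
      have m2 : csrMu runway (s - 1) (i + s - 1) < csrMu runway s i := by unfold csrMu; omega
      have m3 : csrMu runway (s + 1) (i + s + 1) < csrMu runway s i := by unfold csrMu; omega
      have hub : csrMu runway s i ≤ 2 * runway.length + 1 := by unfold csrMu; omega
      rw [csrFuel_irrel (2 * runway.length + 1) (2 * runway.length + 2) runway s (i + s)
          (by omega) (by omega),
        csrFuel_irrel (2 * runway.length + 1) (2 * runway.length + 2) runway (s - 1)
          (i + s - 1) (by omega) (by omega),
        csrFuel_irrel (2 * runway.length + 1) (2 * runway.length + 2) runway (s + 1)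
          (i + s + 1) (by omega) (by omega)]

lemma goMemo_succ (runway : List Bool) (fuel : Nat) (s i : Int)
    (m : PySem.Dict (Int × Int) Bool) :
    goMemo runway (fuel + 1) s i m =
      if i ≥ (runway.length : Int) ∨ i < 0 ∨ s < 0 ∨
          ((PySem.List.pyGet? runway i).getD false) = false then
        (false, m)
      else if s = 0 then
        (true, m)
      else
        match m.get? (i, s) with
        | some v => (v, m)
        | none =>
          let p1 := goMemo runway fuel s (i + s) m
          if p1.1 then (true, p1.2.insert (i, s) true)
          else
            let p2 := goMemo runway fuel (s - 1) (i + s - 1) p1.2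
            if p2.1 then (true, p2.2.insert (i, s) true)
            else
              let p3 := goMemo runway fuel (s + 1) (i + s + 1) p2.2
              (p3.1, p3.2.insert (i, s) p3.1) := rfl

-- every value stored in the memo is A's value at its state
def MemoOK (runway : List Bool) (m : PySem.Dict (Int × Int) Bool) : Prop :=
  ∀ (i s : Int) (b : Bool), m.get? (i, s) = some b → b = canStopRecusive runway s i

lemma memoOK_insert (runway : List Bool) (m : PySem.Dict (Int × Int) Bool)
    (hOK : MemoOK runway m) (i s : Int) (b : Bool) (hb : b = canStopRecusive runway s i) :
    MemoOK runway (m.insert (i, s) b) := by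
  intro j t c hc
  rw [PySem.Dict.get?_insert] at hc
  by_cases hjt : ((j, t) : Int × Int) = (i, s)
  · rw [if_pos hjt] at hc
    obtain ⟨h1, h2⟩ := Prod.mk.injEq .. ▸ hjt
    subst h1; subst h2
    cases hc; exact hb
  · rw [if_neg hjt] at hc
    exact hOK j t c hc

lemma go_spec (runway : List Bool) : ∀ (fuel : Nat) (s i : Int)
    (m : PySem.Dict (Int × Int) Bool), csrMu runway s i < fuel → MemoOK runway m →
    (goMemo runway fuel s i m).1 = canStopRecusive runway s i ∧
      MemoOK runway (goMemo runway fuel s i m).2 := by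
  intro fuel
  induction fuel with
  | zero => intro s i m hf _; exact absurd hf (Nat.not_lt_zero _)
  | succ fuel ih =>
    intro s i m hf hOK
    rw [goMemo_succ]
    by_cases hg : i ≥ (runway.length : Int) ∨ i < 0 ∨ s < 0 ∨
        ((PySem.List.pyGet? runway i).getD false) = false
    · rw [if_pos hg]
      exact ⟨by rw [A_eq, if_pos hg], hOK⟩
    · rw [if_neg hg]
      by_cases hz : s = 0
      · rw [if_pos hz]
        exact ⟨by rw [A_eq, if_neg hg, if_pos hz], hOK⟩
      · rw [if_neg hz]
        push_neg at hg
        obtain ⟨h1, h2, h3, _⟩ := hg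
        have m1 : csrMu runway s (i + s) < csrMu runway s i := by unfold csrMu; omega
        have m2 : csrMu runway (s - 1) (i + s - 1) < csrMu runway s i := by unfold csrMu; omega
        have m3 : csrMu runway (s + 1) (i + s + 1) < csrMu runway s i := by unfold csrMu; omega
        have hAi : canStopRecusive runway s i =
            (canStopRecusive runway s (i + s) || canStopRecusive runway (s - 1) (i + s - 1) ||
              canStopRecusive runway (s + 1) (i + s + 1)) := by
          rw [A_eq, if_neg (by push_neg; exact ⟨by omega, by omega, by omega, by assumption⟩),
            if_neg hz]
        cases hm : m.get? (i, s) with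
        | some v =>
          exact ⟨hOK i s v hm, hOK⟩
        | none =>
          obtain ⟨e1, k1⟩ := ih s (i + s) m (by omega) hOK
          by_cases hp1 : (goMemo runway fuel s (i + s) m).1 = true
          · simp only [hp1, if_pos]
            refine ⟨?_, memoOK_insert runway _ k1 i s true ?_⟩
            · rw [hAi, ← e1, hp1]; rfl
            · rw [hAi, ← e1, hp1]; rfl
          · obtain ⟨e2, k2⟩ := ih (s - 1) (i + s - 1) (goMemo runway fuel s (i + s) m).2
              (by omega) k1
            by_cases hp2 : (goMemo runway fuel (s - 1) (i + s - 1)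
                (goMemo runway fuel s (i + s) m).2).1 = true
            · simp only [Bool.not_eq_true] at hp1
              simp only [hp1, hp2, Bool.false_eq_true, if_false, if_pos]
              refine ⟨?_, memoOK_insert runway _ k2 i s true ?_⟩
              · rw [hAi, ← e1, ← e2, hp1, hp2]; rfl
              · rw [hAi, ← e1, ← e2, hp1, hp2]; rfl
            · obtain ⟨e3, k3⟩ := ih (s + 1) (i + s + 1)
                (goMemo runway fuel (s - 1) (i + s - 1) (goMemo runway fuel s (i + s) m).2).2
                (by omega) k2
              simp only [Bool.not_eq_true] at hp1 hp2
              simp only [hp1, hp2, Bool.false_eq_true, if_false]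
              refine ⟨?_, memoOK_insert runway _ k3 i s _ ?_⟩
              · rw [hAi, ← e1, ← e2, ← e3, hp1, hp2]; simp
              · rw [hAi, ← e1, ← e2, ← e3, hp1, hp2]; simp

-- ===== VERDICT (by name: the statement is the Claim_ definition above) =====
theorem canStopRecusive_spec : Claim_equal_canStopRecusive := by
  intro runway s i _
  unfold Spec_canStopRecusive canStopRecusive_alt
  by_cases hg : i ≥ (runway.length : Int) ∨ i < 0 ∨ s < 0 ∨
      ((PySem.List.pyGet? runway i).getD false) = false
  · rw [show 2 * runway.length + 2 = (2 * runway.length + 1) + 1 from rfl, goMemo_succ,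
      if_pos hg, A_eq, if_pos hg]
  · have hmu : csrMu runway s i < 2 * runway.length + 2 := by
      push_neg at hg; unfold csrMu; omega
    have hemp : MemoOK runway PySem.Dict.empty := by
      intro j t c hc; rw [PySem.Dict.get?_empty] at hc; cases hc
    exact (go_spec runway (2 * runway.length + 2) s i PySem.Dict.empty hmu hemp).1.symm
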